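-- pv_equiv track=rewrite | github.com/CUGfred/competition_compute | enumerate_result.py | compute_competitons
-- ===== SOURCE A (Python) =====
-- import copy
--
-- def run_competiton(competition, board):
--     win_case  = copy.deepcopy(board)
--     lose_case = copy.deepcopy(board)
--
--     win_case[competition[0]][0] += 1
--     win_case[competition[1]][1] += 1
--
--     lose_case[competition[0]][1] += 1
--     lose_case[competition[1]][0]  += 1
--
--     return win_case, lose_case
--
-- def compute_competitons(competitions, results):
--     for competition in competitions:
--         stage_result = []
--         for result in results:
--             win_case, lose_case = run_competiton(competition=competition, board=result)
--             stage_result.append(win_case)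
--             stage_result.append(lose_case)
--
--         results = stage_result
--     return results
-- ===== SOURCE B (Python) =====
-- import copy
--
-- def _patterns(n):
--     # all win/lose patterns, win (True) first, first competition most significant
--     if n == 0:
--         return [[]]
--     rest = _patterns(n - 1)
--     return [[b] + p for b in (True, False) for p in rest]
--
-- def compute_competitons(competitions, results):
--     out = []
--     for result in results:
--         for pattern in _patterns(len(competitions)):
--             board = copy.deepcopy(result)
--             for competition, is_win in zip(competitions, pattern):
--                 if is_win:
--                     board[competition[0]][0] += 1
--                     board[competition[1]][1] += 1
--                 else:
--                     board[competition[0]][1] += 1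
--                     board[competition[1]][0] += 1
--             out.append(board)
--     return out
-- ===== Notes on version B (the rewrite author's own statement) =====
-- stated objective: alternative
-- what changed: B replaces A's repeated list-doubling (each competition maps the whole board list to win/lose pairs) by direct enumeration: for each starting board it generates all 2^n win/lose patterns (win first, first competition most significant) and builds each final board in a single pass over the competitions.
import Mathlib
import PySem

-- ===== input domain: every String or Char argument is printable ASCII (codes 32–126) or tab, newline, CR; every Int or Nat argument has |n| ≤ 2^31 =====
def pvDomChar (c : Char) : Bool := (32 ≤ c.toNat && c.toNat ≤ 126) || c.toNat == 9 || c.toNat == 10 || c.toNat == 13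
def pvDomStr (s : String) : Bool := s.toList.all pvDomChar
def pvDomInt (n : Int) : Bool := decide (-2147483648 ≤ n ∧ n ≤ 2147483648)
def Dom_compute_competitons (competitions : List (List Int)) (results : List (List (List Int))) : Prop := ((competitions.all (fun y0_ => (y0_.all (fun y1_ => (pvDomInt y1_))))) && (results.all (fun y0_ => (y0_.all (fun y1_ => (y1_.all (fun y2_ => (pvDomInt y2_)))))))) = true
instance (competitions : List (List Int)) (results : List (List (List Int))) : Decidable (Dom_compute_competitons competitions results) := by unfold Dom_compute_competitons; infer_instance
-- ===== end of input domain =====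

-- B enumerates all 2^n win/lose patterns directly and builds each final board in one
-- pass, instead of A's repeated list-doubling over intermediate board lists (objective: alternative).

-- board[i][j] += 1  (Python semantics: negative index from the end; total form, exact under Pre_)
def pyIncr (b : List (List Int)) (i j : Int) : List (List Int) :=
  let row := PySem.List.pyGetD b i []
  PySem.List.pySetD b i (PySem.List.pySetD row j (PySem.List.pyGetD row j 0 + 1))

-- ===== PORT A =====
def run_competiton (competition : List Int) (board : List (List Int)) :
    List (List Int) × List (List Int) :=
  let win_case := pyIncr (pyIncr board (PySem.List.pyGetD competition 0 0) 0)
                         (PySem.List.pyGetD competition 1 0) 1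
  let lose_case := pyIncr (pyIncr board (PySem.List.pyGetD competition 0 0) 1)
                          (PySem.List.pyGetD competition 1 0) 0
  (win_case, lose_case)

def compute_competitons (competitions : List (List Int)) (results : List (List (List Int))) : List (List (List Int)) :=
  competitions.foldl (fun results competition =>
    results.foldl (fun stage_result result =>
      let wl := run_competiton competition result
      (stage_result ++ [wl.1]) ++ [wl.2]) []) results

-- ===== PORT B =====
-- all win/lose patterns, win (True) first, first competition most significant
def pvPatterns : Nat → List (List Bool)
  | 0 => [[]]
  | n + 1 => [true, false].flatMap (fun b => (pvPatterns n).map (fun p => b :: p))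

def compute_competitons_alt (competitions : List (List Int)) (results : List (List (List Int))) : List (List (List Int)) :=
  results.foldl (fun out result =>
    (pvPatterns competitions.length).foldl (fun out pattern =>
      let board := (competitions.zip pattern).foldl (fun board cw =>
        if cw.2 then
          pyIncr (pyIncr board (PySem.List.pyGetD cw.1 0 0) 0) (PySem.List.pyGetD cw.1 1 0) 1
        else
          pyIncr (pyIncr board (PySem.List.pyGetD cw.1 0 0) 1) (PySem.List.pyGetD cw.1 1 0) 0)
        result
      out ++ [board]) out) []

-- ===== PRECONDITION & SPEC =====
-- board row index i valid for r, and the pointed row long enough for indices 0 and 1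
def pvOkIdx (r : List (List Int)) (i : Int) : Prop :=
  PySem.Raise.InRange r.length i ∧ 2 ≤ (PySem.List.pyGetD r i []).length

-- exactly the inputs on which A returns (no IndexError): each competition has two entries,
-- both valid row indices into every board, and both pointed rows have at least two columns
def Pre_compute_competitons (competitions : List (List Int)) (results : List (List (List Int))) : Prop :=
  ∀ c ∈ competitions, ∀ r ∈ results,
    2 ≤ c.length ∧ pvOkIdx r (PySem.List.pyGetD c 0 0) ∧ pvOkIdx r (PySem.List.pyGetD c 1 0)

instance (competitions : List (List Int)) (results : List (List (List Int))) : Decidable (Pre_compute_competitons competitions results) := by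
  unfold Pre_compute_competitons pvOkIdx; infer_instance

def pvWitness_compute_competitons : List (List Int) × List (List (List Int)) :=
  ([[0, 1]], [[[0, 0], [0, 0]]])

def Spec_compute_competitons (competitions : List (List Int)) (results : List (List (List Int))) (out : List (List (List Int))) : Prop := out = compute_competitons_alt competitions results
instance (competitions : List (List Int)) (results : List (List (List Int))) (out : List (List (List Int))) : Decidable (Spec_compute_competitons competitions results out) := by unfold Spec_compute_competitons; infer_instance

-- ===== CLAIM (what is proved, stated in full; the proofs are below) =====
def Claim_equal_compute_competitons : Prop := ∀ (competitions : List (List Int)) (results : List (List (List Int))), Dom_compute_competitons competitions results → Pre_compute_competitons competitions results → Spec_compute_competitons competitions results (compute_competitons competitions results) 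

-- ===== LEMMAS AND PROOFS =====

-- the per-(competition, win-bit) board transformer shared by both characterisations
def pvStep (c : List Int) (w : Bool) (board : List (List Int)) : List (List Int) :=
  if w then
    pyIncr (pyIncr board (PySem.List.pyGetD c 0 0) 0) (PySem.List.pyGetD c 1 0) 1
  else
    pyIncr (pyIncr board (PySem.List.pyGetD c 0 0) 1) (PySem.List.pyGetD c 1 0) 0

lemma runCompetiton_eq (c : List Int) (b : List (List Int)) :
    run_competiton c b = (pvStep c true b, pvStep c false b) := rfl

-- one stage of A appends win then lose for each board
lemma stageA_eq (c : List Int) (rs : List (List (List Int))) (acc : List (List (List Int))) :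
    rs.foldl (fun stage result =>
        let wl := run_competiton c result
        (stage ++ [wl.1]) ++ [wl.2]) acc
      = acc ++ rs.flatMap (fun r => [pvStep c true r, pvStep c false r]) := by
  induction rs generalizing acc with
  | nil => simp
  | cons r rs ih => simp [runCompetiton_eq, List.flatMap_def]

-- the main characterisation: A's list-doubling fold = direct pattern enumeration
lemma foldA_eq_patterns (cs : List (List Int)) (rs : List (List (List Int))) :
    cs.foldl (fun results c =>
        results.foldl (fun stage result =>
          let wl := run_competiton c result
          (stage ++ [wl.1]) ++ [wl.2]) []) rs
      = rs.flatMap (fun r => (pvPatterns cs.length).map (fun p =>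
          (cs.zip p).foldl (fun b cw => pvStep cw.1 cw.2 b) r)) := by
  induction cs generalizing rs with
  | nil => simp [pvPatterns]
  | cons c cs ih =>
    rw [List.foldl_cons, stageA_eq, ih, List.nil_append, List.flatMap_assoc]
    congr 1
    funext r
    simp only [List.length_cons, pvPatterns, List.flatMap_cons, List.flatMap_nil, List.map_append, List.map_map,
      List.append_nil]
    congr 1

lemma altBody_eq (cs : List (List Int)) (pattern : List Bool) (r : List (List Int)) :
    (cs.zip pattern).foldl (fun board cw =>
        if cw.2 then
          pyIncr (pyIncr board (PySem.List.pyGetD cw.1 0 0) 0) (PySem.List.pyGetD cw.1 1 0) 1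
        else
          pyIncr (pyIncr board (PySem.List.pyGetD cw.1 0 0) 1) (PySem.List.pyGetD cw.1 1 0) 0) r
      = (cs.zip pattern).foldl (fun b cw => pvStep cw.1 cw.2 b) r := by
  rfl

-- B's nested appending loops = the same flatMap/map enumeration
lemma alt_eq_patterns (cs : List (List Int)) (rs : List (List (List Int))) :
    compute_competitons_alt cs rs
      = rs.flatMap (fun r => (pvPatterns cs.length).map (fun p =>
          (cs.zip p).foldl (fun b cw => pvStep cw.1 cw.2 b) r)) := by
  unfold compute_competitons_alt
  simp only [altBody_eq]
  rw [show (fun (out : List (List (List Int))) (result : List (List Int)) =>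
        (pvPatterns cs.length).foldl (fun out pattern =>
          out ++ [(cs.zip pattern).foldl (fun b cw => pvStep cw.1 cw.2 b) result]) out)
      = (fun out result => out ++ (pvPatterns cs.length).map (fun p =>
          (cs.zip p).foldl (fun b cw => pvStep cw.1 cw.2 b) result)) from by
    funext out result
    exact PySem.List.foldl_append_singleton_eq_map ..]
  rw [PySem.List.foldl_append_eq_flatMap]
  simp

-- ===== VERDICT (by name: the statement is the Claim_ definition above) =====
theorem compute_competitons_spec : Claim_equal_compute_competitons := by
  intro cs rs _ _
  unfold Spec_compute_competitons compute_competitons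
  rw [foldA_eq_patterns, alt_eq_patterns]
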